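-- pv_equiv track=rewrite | github.com/jamil-said/code-samples | Python_code_challenges/formatJustifyText.py | joining
-- ===== SOURCE A (Python) =====
-- def spaceAdd(i, cntSpace, l, lastLine):
--     if i < cntSpace:
--         return 1 if lastLine else (l // cntSpace) + int(i < l % cntSpace)
--     return 0
--
-- def joining(words, l, begin, end, lnght, lastLine):
--     s, n = [], end - begin
--     for i in range(n):
--         s += words[begin + i],
--         s += ' ' * spaceAdd(i, n - 1, l - lnght, lastLine),
--     line = "".join(s)
--     if len(line) < l:
--         line += ' ' * (l - len(line))
--     return line
-- ===== SOURCE B (Python) =====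
-- def joining(words, l, begin, end, lnght, lastLine):
--     n = end - begin
--     chunk = [words[begin + i] for i in range(n)]
--     if lastLine or n <= 1:
--         line = ' '.join(chunk)
--     else:
--         # greedy redistribution: each gap takes the ceiling of the remaining
--         # spaces over the remaining gaps (running remainder, no precomputed q,r)
--         parts = []
--         rem = l - lnght
--         gaps = n - 1
--         for w in chunk[:-1]:
--             gap = -(-rem // gaps)
--             parts.append(w + ' ' * gap)
--             rem -= gap
--             gaps -= 1
--         parts.append(chunk[-1])
--         line = ''.join(parts)
--     return line + ' ' * (l - len(line))
-- ===== Notes on version B (the rewrite author's own statement) =====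
-- stated objective: alternative
-- what changed: B justifies the line by greedy remainder redistribution: it keeps a running remainder and remaining-gap counter and gives each gap the ceiling of remainder/gaps-left (updating both), instead of A's closed-form per-index gap width (l//cnt plus a comparison of the index against l%cnt) computed independently for every position by the spaceAdd helper.
import Mathlib
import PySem

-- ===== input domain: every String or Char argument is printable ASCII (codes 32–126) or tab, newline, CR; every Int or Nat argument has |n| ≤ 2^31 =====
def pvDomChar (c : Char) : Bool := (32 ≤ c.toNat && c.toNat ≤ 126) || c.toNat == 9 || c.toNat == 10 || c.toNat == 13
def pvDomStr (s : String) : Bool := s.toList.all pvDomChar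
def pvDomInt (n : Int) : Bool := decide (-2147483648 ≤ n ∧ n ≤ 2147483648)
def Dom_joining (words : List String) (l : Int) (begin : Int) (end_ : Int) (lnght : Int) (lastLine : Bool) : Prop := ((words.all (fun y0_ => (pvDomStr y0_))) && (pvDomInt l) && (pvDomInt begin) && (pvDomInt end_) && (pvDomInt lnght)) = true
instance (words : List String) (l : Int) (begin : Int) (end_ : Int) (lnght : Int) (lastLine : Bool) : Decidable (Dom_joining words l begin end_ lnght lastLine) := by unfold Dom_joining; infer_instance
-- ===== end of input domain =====

-- B justifies the line by greedy remainder redistribution (each gap gets the ceiling of the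
-- remaining spaces over the remaining gaps, updating a running remainder) instead of A's
-- closed-form per-index gap computed by the spaceAdd helper; same cost, return value proved equal.

-- ' ' * k : Python string repetition of a space (a negative or zero k gives ""); exact.
def pySpaces (k : Int) : String := String.ofList (List.replicate k.toNat ' ')

-- ===== PORT A =====
def spaceAdd (i cntSpace l : Int) (lastLine : Bool) : Int :=
  if i < cntSpace then
    if lastLine then 1
    else PySem.Int.floordiv l cntSpace + (if i < PySem.Int.mod l cntSpace then 1 else 0)
  else 0

def joining (words : List String) (l : Int) (begin : Int) (end_ : Int) (lnght : Int) (lastLine : Bool) : String :=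
  let n := end_ - begin
  let s : List String := (PySem.List.pyRange 0 n 1).foldl
    (fun acc i => acc ++ [PySem.List.pyGetD words (begin + i) ""]
                      ++ [pySpaces (spaceAdd i (n - 1) (l - lnght) lastLine)]) []
  let line := PySem.Str.join "" s
  if PySem.Str.len line < l then line ++ pySpaces (l - PySem.Str.len line) else line

-- ===== PORT B =====
-- the loop "for w in chunk[:-1]: gap = -(-rem // gaps); parts.append(w + ' '*gap); rem -= gap; gaps -= 1"
-- followed by "parts.append(chunk[-1])", as structural recursion on the chunk
def greedyParts : List String → Int → Int → List String
  | [], _, _ => []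
  | [w], _, _ => [w]
  | w :: w2 :: rest, rem, gaps =>
      let gap := -(PySem.Int.floordiv (-rem) gaps)
      (w ++ pySpaces gap) :: greedyParts (w2 :: rest) (rem - gap) (gaps - 1)

def joining_alt (words : List String) (l : Int) (begin : Int) (end_ : Int) (lnght : Int) (lastLine : Bool) : String :=
  let n := end_ - begin
  let chunk := (PySem.List.pyRange 0 n 1).map (fun i => PySem.List.pyGetD words (begin + i) "")
  let line :=
    if lastLine = true ∨ n ≤ 1 then PySem.Str.join " " chunk
    else PySem.Str.join "" (greedyParts chunk (l - lnght) (n - 1))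
  line ++ pySpaces (l - PySem.Str.len line)

-- ===== PRECONDITION & SPEC =====
-- Pre_ excludes exactly the inputs where A raises IndexError (some words[begin+i] out of range, Python negative indexing included).
def Pre_joining (words : List String) (l : Int) (begin : Int) (end_ : Int) (lnght : Int) (lastLine : Bool) : Prop :=
  end_ - begin ≤ 0 ∨ (-(words.length : Int) ≤ begin ∧ end_ ≤ (words.length : Int))
instance (words : List String) (l : Int) (begin : Int) (end_ : Int) (lnght : Int) (lastLine : Bool) : Decidable (Pre_joining words l begin end_ lnght lastLine) := by unfold Pre_joining; infer_instance

def pvWitness_joining : List String × Int × Int × Int × Int × Bool := (["ab", "c", "de"], 10, 0, 3, 5, false)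

def Spec_joining (words : List String) (l : Int) (begin : Int) (end_ : Int) (lnght : Int) (lastLine : Bool) (out : String) : Prop := out = joining_alt words l begin end_ lnght lastLine
instance (words : List String) (l : Int) (begin : Int) (end_ : Int) (lnght : Int) (lastLine : Bool) (out : String) : Decidable (Spec_joining words l begin end_ lnght lastLine out) := by unfold Spec_joining; infer_instance

-- ===== CLAIM (what is proved, stated in full; the proofs are below) =====
def Claim_equal_joining : Prop := ∀ (words : List String) (l : Int) (begin : Int) (end_ : Int) (lnght : Int) (lastLine : Bool), Dom_joining words l begin end_ lnght lastLine → Pre_joining words l begin end_ lnght lastLine → Spec_joining words l begin end_ lnght lastLine (joining words l begin end_ lnght lastLine)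

-- ===== LEMMAS AND PROOFS =====

-- the final padding step of A (proof-side abbreviation)
def pad (l : Int) (line : String) : String :=
  if PySem.Str.len line < l then line ++ pySpaces (l - PySem.Str.len line) else line

-- A's conditional padding equals B's unconditional append of ' ' * (l - len line)
theorem pad_eq (l : Int) (line : String) : pad l line = line ++ pySpaces (l - PySem.Str.len line) := by
  unfold pad
  split_ifs with h
  · rfl
  · apply String.toList_inj.mp
    simp only [PySem.Str.len_eq, not_lt] at h
    have hl : line.length = line.toList.length := rfl
    simp [pySpaces]
    omega

-- ''.join is concatenation
theorem join_nil_flatten (yss : List (List Char)) : PySem.Chars.join [] yss = yss.flatten := by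
  induction yss with
  | nil => simp [PySem.Chars.join_nil]
  | cons p rest ih =>
    cases rest with
    | nil => simp [PySem.Chars.join_singleton]
    | cons q rs => rw [PySem.Chars.join_cons_cons]; simp [ih]

-- flatten of word/gap pairs is flatten of the concatenations
theorem flatMap_pairs {α : Type} (u v : α → List Char) (xs : List α) :
    (xs.flatMap fun i => [u i, v i]).flatten = (xs.map fun i => u i ++ v i).flatten := by
  induction xs with
  | nil => rfl
  | cons x t ih => simp [ih]

-- enumerate of a mapped list
theorem enum_map {α β : Type} (f : α → β) (xs : List α) (s : Int) :
    PySem.List.enumerate (xs.map f) s = (PySem.List.enumerate xs s).map (fun p => (p.1, f p.2)) := by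
  induction xs generalizing s with
  | nil => simp [PySem.List.enumerate_nil]
  | cons x t ih => simp [PySem.List.enumerate_cons, ih]

-- enumerating range(a, n) starting at a pairs each index with itself
theorem enum_id_range : ∀ (m : Nat) (a n : Int), (n - a).toNat = m →
    PySem.List.enumerate (PySem.List.pyRange a n 1) a = (PySem.List.pyRange a n 1).map (fun i => (i, i)) := by
  intro m
  induction m with
  | zero =>
    intro a n hm
    rw [PySem.List.pyRange_one_eq_nil (by omega)]
    simp [PySem.List.enumerate_nil]
  | succ k ih =>
    intro a n hm
    have h : a < n := by omega
    rw [PySem.List.pyRange_one_cons h, PySem.List.enumerate_cons, List.map_cons, ih (a + 1) n (by omega)]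

-- ' '.join over a nonempty range of words, as a flatten of word/gap concatenations
theorem joinSpace (w : Int → List Char) : ∀ (m : Nat) (a n : Int), (n - a).toNat = m → a < n →
    PySem.Chars.join [' '] ((PySem.List.pyRange a n 1).map w) =
    ((PySem.List.pyRange a n 1).map (fun i => w i ++ if i = n - 1 then [] else [' '])).flatten := by
  intro m
  induction m with
  | zero => intro a n hm h; omega
  | succ k ih =>
    intro a n hm h
    by_cases h2 : a + 1 < n
    · rw [PySem.List.pyRange_one_cons h, PySem.List.pyRange_one_cons h2, List.map_cons, List.map_cons,
          PySem.Chars.join_cons_cons, ← List.map_cons, ← PySem.List.pyRange_one_cons h2,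
          ih (a + 1) n (by omega) h2]
      have hne : ¬ a = n - 1 := by omega
      simp [hne, List.append_assoc]
    · have hnil : PySem.List.pyRange (a + 1) n 1 = [] := PySem.List.pyRange_one_eq_nil (by omega)
      have ha : a = n - 1 := by omega
      rw [PySem.List.pyRange_one_cons h, hnil]
      simp [PySem.Chars.join_singleton, ha]

-- the greedy gap: ceiling division of q*g + r by g, with 0 ≤ r < g, gives q plus one iff r > 0
theorem ceil_gap (q g r : Int) (hg : 0 < g) (hr0 : 0 ≤ r) (hrg : r < g) :
    -(PySem.Int.floordiv (-(q * g + r)) g) = q + (if 0 < r then 1 else 0) := by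
  rw [PySem.Int.neg_floordiv_neg_eq_iff_of_pos hg]
  split_ifs with h
  · constructor <;> nlinarith
  · constructor <;> nlinarith

-- every index produced by enumerate xs s is at least s
theorem enum_fst_ge {α : Type} (xs : List α) (s : Int) (p : Int × α)
    (hp : p ∈ PySem.List.enumerate xs s) : s ≤ p.1 := by
  rw [PySem.List.mem_enumerate_iff] at hp
  obtain ⟨k, hk, rfl⟩ := hp
  simp

-- the greedy pass produces exactly the per-index gaps q + (idx < r), flattened
theorem greedy_eq : ∀ (chunk : List String) (s q r : Int), 0 ≤ r →
    (r < (chunk.length : Int) - 1 ∨ r = 0) →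
    ((greedyParts chunk (q * ((chunk.length : Int) - 1) + r) ((chunk.length : Int) - 1)).map String.toList).flatten =
    ((PySem.List.enumerate chunk s).map (fun p => p.2.toList ++
        (if p.1 = s + (chunk.length : Int) - 1 then []
         else List.replicate (q + if p.1 < s + r then 1 else 0).toNat ' '))).flatten := by
  intro chunk
  induction chunk with
  | nil => intro s q r _ _; simp [greedyParts, PySem.List.enumerate_nil]
  | cons w rest ih =>
    intro s q r hr0 hr1
    cases rest with
    | nil =>
      simp [greedyParts, PySem.List.enumerate_cons, PySem.List.enumerate_nil]
    | cons w2 rs =>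
      have hlen2 : (w :: w2 :: rs).length = (w2 :: rs).length + 1 := rfl
      have hlen3 : (w2 :: rs).length = rs.length + 1 := rfl
      have hm : (0 : Int) < ((w2 :: rs).length : Int) := by omega
      have hglen : ((w :: w2 :: rs).length : Int) - 1 = ((w2 :: rs).length : Int) := by
        rw [hlen2]; push_cast; ring
      have hrg : r < ((w2 :: rs).length : Int) := by rcases hr1 with h | h <;> omega
      rw [greedyParts, PySem.List.enumerate_cons]
      simp only [List.map_cons, List.flatten_cons]
      have hgap : -(PySem.Int.floordiv (-(q * (((w :: w2 :: rs).length : Int) - 1) + r)) (((w :: w2 :: rs).length : Int) - 1))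
          = q + (if 0 < r then 1 else 0) := by
        rw [hglen]; exact ceil_gap q _ r hm hr0 hrg
      have hrem : q * (((w :: w2 :: rs).length : Int) - 1) + r - -(PySem.Int.floordiv (-(q * (((w :: w2 :: rs).length : Int) - 1) + r)) (((w :: w2 :: rs).length : Int) - 1))
          = q * (((w2 :: rs).length : Int) - 1) + (if 0 < r then r - 1 else 0) := by
        rw [hgap]
        split_ifs with h
        · rw [hglen]; ring
        · have hr : r = 0 := by omega
          subst hr; rw [hglen]; ring
      have hgaps : (((w :: w2 :: rs).length : Int) - 1) - 1 = ((w2 :: rs).length : Int) - 1 := by omega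
      rw [hrem, hgaps, hgap,
        ih (s + 1) q (if 0 < r then r - 1 else 0) (by split_ifs <;> omega)
          (by split_ifs with h
              · rcases hr1 with h1 | h1
                · left; omega
                · omega
              · right; rfl)]
      have hhead : (if (s : Int) = s + ((w :: w2 :: rs).length : Int) - 1 then ([] : List Char)
            else List.replicate (q + if (s : Int) < s + r then 1 else 0).toNat ' ')
          = List.replicate (q + if 0 < r then 1 else 0).toNat ' ' := by
        rw [if_neg (by omega)]
        have hi : (if (s : Int) < s + r then (1 : Int) else 0) = (if 0 < r then 1 else 0) := by
          split_ifs with h1 h2 h2 <;> omega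
        rw [hi]
      have htail : ((PySem.List.enumerate (w2 :: rs) (s + 1)).map (fun p => p.2.toList ++
            (if p.1 = (s + 1) + ((w2 :: rs).length : Int) - 1 then []
             else List.replicate (q + if p.1 < (s + 1) + (if 0 < r then r - 1 else 0) then 1 else 0).toNat ' ')))
          = ((PySem.List.enumerate (w2 :: rs) (s + 1)).map (fun p => p.2.toList ++
            (if p.1 = s + ((w :: w2 :: rs).length : Int) - 1 then []
             else List.replicate (q + if p.1 < s + r then 1 else 0).toNat ' '))) := by
        apply List.map_congr_left
        intro p hp
        have hge : s + 1 ≤ p.1 := enum_fst_ge _ _ _ hp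
        congr 1
        by_cases h1 : p.1 = (s + 1) + ((w2 :: rs).length : Int) - 1
        · rw [if_pos h1, if_pos (by omega)]
        · have h2 : ¬ (p.1 = s + ((w :: w2 :: rs).length : Int) - 1) := by omega
          have hi : (if p.1 < (s + 1) + (if 0 < r then r - 1 else 0) then (1 : Int) else 0)
              = (if p.1 < s + r then 1 else 0) := by
            split_ifs <;> omega
          rw [if_neg h2, if_neg h1, hi]
      rw [htail, hhead]
      simp [pySpaces, List.append_assoc]

-- ===== VERDICT (by name: the statement is the Claim_ definition above) =====
theorem joining_spec : Claim_equal_joining := by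
  intro words l begin end_ lnght lastLine _ _
  unfold Spec_joining
  have hA : joining words l begin end_ lnght lastLine =
      pad l (PySem.Str.join "" ((PySem.List.pyRange 0 (end_ - begin) 1).foldl
        (fun acc i => acc ++ [PySem.List.pyGetD words (begin + i) ""]
          ++ [pySpaces (spaceAdd i (end_ - begin - 1) (l - lnght) lastLine)]) [])) := rfl
  have hB : joining_alt words l begin end_ lnght lastLine =
      (if lastLine = true ∨ end_ - begin ≤ 1 then
          PySem.Str.join " " ((PySem.List.pyRange 0 (end_ - begin) 1).map
            (fun i => PySem.List.pyGetD words (begin + i) ""))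
        else
          PySem.Str.join "" (greedyParts ((PySem.List.pyRange 0 (end_ - begin) 1).map
            (fun i => PySem.List.pyGetD words (begin + i) "")) (l - lnght) (end_ - begin - 1)))
      ++ pySpaces (l - PySem.Str.len (if lastLine = true ∨ end_ - begin ≤ 1 then
          PySem.Str.join " " ((PySem.List.pyRange 0 (end_ - begin) 1).map
            (fun i => PySem.List.pyGetD words (begin + i) ""))
        else
          PySem.Str.join "" (greedyParts ((PySem.List.pyRange 0 (end_ - begin) 1).map
            (fun i => PySem.List.pyGetD words (begin + i) "")) (l - lnght) (end_ - begin - 1)))) := rfl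
  rw [hA, hB, ← pad_eq]
  refine congrArg (pad l) ?_
  apply String.toList_inj.mp
  have hassoc : (fun (acc : List String) (i : Int) => acc ++ [PySem.List.pyGetD words (begin + i) ""]
        ++ [pySpaces (spaceAdd i (end_ - begin - 1) (l - lnght) lastLine)])
      = fun acc i => acc ++ ([PySem.List.pyGetD words (begin + i) ""]
        ++ [pySpaces (spaceAdd i (end_ - begin - 1) (l - lnght) lastLine)]) := by
    funext acc i; rw [List.append_assoc]
  have h0 : ("" : String).toList = ([] : List Char) := rfl
  rw [hassoc, PySem.List.foldl_append_eq_flatMap, List.nil_append, PySem.Str.toList_join, h0,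
    join_nil_flatten]
  simp only [List.map_flatMap, List.singleton_append, List.map_cons, List.map_nil]
  rw [flatMap_pairs]
  by_cases hc : lastLine = true ∨ end_ - begin ≤ 1
  · rw [if_pos hc, PySem.Str.toList_join, List.map_map]
    by_cases hn : end_ - begin ≤ 0
    · rw [PySem.List.pyRange_one_eq_nil (by omega)]
      simp [PySem.Chars.join_nil]
    · have hsp : (" " : String).toList = [' '] := rfl
      rw [hsp, joinSpace _ (end_ - begin).toNat 0 (end_ - begin) (by omega) (by omega)]
      congr 1
      apply List.map_congr_left
      intro i hi
      rw [PySem.List.mem_pyRange_one] at hi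
      by_cases hl : i = end_ - begin - 1
      · have hz : spaceAdd i (end_ - begin - 1) (l - lnght) lastLine = 0 := by
          unfold spaceAdd; rw [if_neg (by omega)]
        rw [hz]
        simp [hl, pySpaces]
      · have hlt : i < end_ - begin - 1 := by omega
        have hLast : lastLine = true := by
          rcases hc with h | h
          · exact h
          · omega
        have h1 : spaceAdd i (end_ - begin - 1) (l - lnght) lastLine = 1 := by
          unfold spaceAdd; rw [if_pos hlt, hLast]; rfl
        rw [h1]
        simp [hl, pySpaces]
  · obtain ⟨hLast, hn⟩ := not_or.mp hc
    have hLast' : lastLine = false := by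
      cases lastLine
      · rfl
      · exact absurd rfl hLast
    have hlen : ((((PySem.List.pyRange 0 (end_ - begin) 1).map
        (fun i => PySem.List.pyGetD words (begin + i) "")).length : Int)) = end_ - begin := by
      rw [List.length_map, PySem.List.length_pyRange_one]; omega
    have hpos : (0 : Int) < end_ - begin - 1 := by omega
    have hr0 : 0 ≤ PySem.Int.mod (l - lnght) (end_ - begin - 1) := by
      rw [PySem.Int.mod_eq_emod_of_pos hpos]
      exact Int.emod_nonneg _ (by omega)
    have hrlt : PySem.Int.mod (l - lnght) (end_ - begin - 1) < end_ - begin - 1 := by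
      rw [PySem.Int.mod_eq_emod_of_pos hpos]
      exact Int.emod_lt_of_pos _ hpos
    have e1 : l - lnght = PySem.Int.floordiv (l - lnght) (end_ - begin - 1)
        * ((((PySem.List.pyRange 0 (end_ - begin) 1).map
            (fun i => PySem.List.pyGetD words (begin + i) "")).length : Int) - 1)
        + PySem.Int.mod (l - lnght) (end_ - begin - 1) := by
      rw [hlen]
      have := PySem.Int.floordiv_mul_add_mod (l - lnght) (end_ - begin - 1)
      linarith
    have e2 : end_ - begin - 1 = (((PySem.List.pyRange 0 (end_ - begin) 1).map
        (fun i => PySem.List.pyGetD words (begin + i) "")).length : Int) - 1 := by omega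
    have hg := greedy_eq ((PySem.List.pyRange 0 (end_ - begin) 1).map
        (fun i => PySem.List.pyGetD words (begin + i) "")) 0
        (PySem.Int.floordiv (l - lnght) (end_ - begin - 1))
        (PySem.Int.mod (l - lnght) (end_ - begin - 1)) hr0 (by left; omega)
    rw [← e1, ← e2] at hg
    rw [if_neg (by simp [hLast']; omega), PySem.Str.toList_join, h0, join_nil_flatten, hg,
      enum_map, enum_id_range (end_ - begin).toNat 0 (end_ - begin) (by omega)]
    simp only [List.map_map]
    congr 1
    apply List.map_congr_left
    intro i hi
    rw [PySem.List.mem_pyRange_one] at hi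
    simp only [Function.comp_def, zero_add]
    congr 1
    have h1 : spaceAdd i (end_ - begin - 1) (l - lnght) lastLine
        = if i < end_ - begin - 1 then PySem.Int.floordiv (l - lnght) (end_ - begin - 1)
            + (if i < PySem.Int.mod (l - lnght) (end_ - begin - 1) then 1 else 0) else 0 := by
      unfold spaceAdd; rw [hLast']
      simp only [Bool.false_eq_true, if_false]
    split_ifs with hcnd hmod
    · have hz : (if i < end_ - begin - 1 then PySem.Int.floordiv (l - lnght) (end_ - begin - 1)
            + (if i < PySem.Int.mod (l - lnght) (end_ - begin - 1) then 1 else 0) else 0) = 0 := by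
        rw [if_neg (by omega)]
      rw [h1, hz]; simp [pySpaces]
    · rw [h1, if_pos (by omega), if_pos hmod]; simp [pySpaces]
    · rw [h1, if_pos (by omega), if_neg hmod]; simp [pySpaces]
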